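-- pv_equiv track=rewrite | github.com/greenmac/it-ml-ex-nlp | day13-dataframe.py | processname
-- ===== SOURCE A (Python) =====
-- from string import punctuation
--
-- def processname(name):
--     if type(name) == str:
--         for pun in punctuation:
--             name = name.replace(pun, " ")
--         terms = [term for term in name.split() if term != " "]
--         return terms
--     else:
--         return []
-- ===== SOURCE B (Python) =====
-- from string import punctuation
--
-- def processname(name):
--     if type(name) == str:
--         seps = set(punctuation)
--         res = []
--         buf = []
--         for ch in name:
--             if ch in seps or ch.isspace():
--                 if buf:
--                     res.append(''.join(buf))
--                     buf = []
--             else: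
--                 buf.append(ch)
--         if buf:
--             res.append(''.join(buf))
--         return res
--     else:
--         return []
-- ===== Notes on version B (the rewrite author's own statement) =====
-- stated objective: alternative
-- what changed: B replaces A's 32 full-string replace passes plus split plus filter with one single pass over the characters that flushes maximal runs of non-separator (non-punctuation, non-whitespace) characters as tokens.
import Mathlib
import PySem

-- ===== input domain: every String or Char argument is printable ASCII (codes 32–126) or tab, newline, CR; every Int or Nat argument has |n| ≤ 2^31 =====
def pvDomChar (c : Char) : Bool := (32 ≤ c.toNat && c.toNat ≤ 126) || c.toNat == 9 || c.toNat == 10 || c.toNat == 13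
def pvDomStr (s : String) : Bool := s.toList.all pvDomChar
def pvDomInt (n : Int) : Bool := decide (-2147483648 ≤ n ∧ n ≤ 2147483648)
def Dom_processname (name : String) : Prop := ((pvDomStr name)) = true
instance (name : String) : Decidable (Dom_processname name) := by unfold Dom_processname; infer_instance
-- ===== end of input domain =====

-- B replaces A's replace-each-punctuation-then-split pipeline with a single pass over the
-- characters that flushes maximal non-separator runs (objective: alternative decomposition).

-- ===== PORT A =====
-- string.punctuation
def pvPunct : List Char := "!\"#$%&'()*+,-./:;<=>?@[\\]^_`{|}~".toList

-- A's `type(name) == str` guard is always true under the String signature; the else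
-- branch (non-str → []) is unreachable and not ported.
def processname (name : String) : List String :=
  let replaced := pvPunct.foldl (fun s pun => PySem.Str.replace s (String.ofList [pun]) " ") name
  (PySem.Str.split₀ replaced).filter (fun term => term ≠ " ")

-- ===== PORT B =====
-- c in seps or c.isspace()
def pvSep (c : Char) : Bool := pvPunct.contains c || PySem.Chars.isspace c

-- the character loop of Source B: buf is the current run, res the tokens emitted so far
def processnameAltGo : List Char → List Char → List String → List String
  | [], buf, res => if buf.isEmpty then res else res ++ [String.ofList buf]
  | c :: rest, buf, res =>
    if pvSep c then
      if buf.isEmpty then processnameAltGo rest [] res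
      else processnameAltGo rest [] (res ++ [String.ofList buf])
    else processnameAltGo rest (buf ++ [c]) res

def processname_alt (name : String) : List String :=
  processnameAltGo name.toList [] []

-- ===== PRECONDITION & SPEC =====
def Spec_processname (name : String) (out : List String) : Prop := out = processname_alt name
instance (name : String) (out : List String) : Decidable (Spec_processname name out) := by unfold Spec_processname; infer_instance

-- ===== CLAIM (what is proved, stated in full; the proofs are below) =====
def Claim_equal_processname : Prop := ∀ (name : String), Dom_processname name → Spec_processname name (processname name)

-- ===== LEMMAS AND PROOFS =====

-- substituting every punctuation char by a space, pointwise
def pvSubst (ps : List Char) (c : Char) : Char := if ps.contains c then ' ' else c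

-- single-character replace is a map
theorem replaceGo_single (p q : Char) :
    ∀ (l acc : List Char) (fuel : Nat), l.length ≤ fuel →
      PySem.Chars.replace.go [p] [q] fuel l acc
        = acc.reverse ++ l.map (fun c => if c = p then q else c) := by
  intro l
  induction l with
  | nil =>
      intro acc fuel _
      cases fuel <;> simp [PySem.Chars.replace.go]
  | cons c t ih =>
      intro acc fuel hf
      cases fuel with
      | zero => simp at hf
      | succ fuel =>
        rw [PySem.Chars.replace.go]
        by_cases h : c = p
        · subst h
          rw [if_pos (by simp [List.isPrefixOf])]
          rw [show List.drop ([c].length) (c :: t) = t from by simp]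
          rw [ih (List.reverse [q] ++ acc) fuel (by simpa using hf)]
          simp
        · rw [if_neg (by simp [List.isPrefixOf]; exact fun hpc => (h hpc.symm).elim)]
          rw [ih (c :: acc) fuel (by simpa using hf)]
          simp [h]

theorem replace_single (p q : Char) (l : List Char) :
    PySem.Chars.replace l [p] [q] = l.map (fun c => if c = p then q else c) := by
  unfold PySem.Chars.replace
  simp only [List.isEmpty_cons, if_neg]
  rw [replaceGo_single p q l [] l.length le_rfl]
  simp

theorem subst_step (p : Char) (ps : List Char) (hs : ¬ (p :: ps).contains ' ' = true) (c : Char) :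
    pvSubst ps (if c = p then ' ' else c) = pvSubst (p :: ps) c := by
  unfold pvSubst
  by_cases hcp : c = p
  · subst hcp
    rw [if_pos rfl]
    have h1 : ps.contains ' ' = false := by
      rw [Bool.not_eq_true, List.contains_cons, Bool.or_eq_false_iff] at hs
      exact hs.2
    have h2 : (c :: ps).contains c = true := by
      rw [List.contains_cons]; simp
    rw [h1, h2]; simp
  · rw [if_neg hcp]
    have hbe : (c == p) = false := by simp [hcp]
    rw [List.contains_cons, hbe, Bool.false_or]

theorem foldl_replace_eq_map :
    ∀ (ps : List Char), ¬ ps.contains ' ' → ∀ (name : String),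
      (ps.foldl (fun s pun => PySem.Str.replace s (String.ofList [pun]) " ") name).toList
        = name.toList.map (pvSubst ps) := by
  intro ps
  induction ps with
  | nil =>
      intro _ name
      have h : pvSubst [] = fun c => c := by funext c; simp [pvSubst]
      rw [List.foldl_nil, h]
      simp
  | cons p rest ih =>
      intro hs name
      have hrest : ¬ rest.contains ' ' := by
        simp only [List.contains_cons, Bool.or_eq_true] at hs
        exact fun h => hs (Or.inr h)
      rw [List.foldl_cons, ih hrest]
      rw [PySem.Str.toList_replace]
      simp only [String.toList_ofList]
      have : (" " : String).toList = [' '] := by decide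
      rw [this, replace_single, List.map_map]
      apply List.map_congr_left
      intro c _
      exact subst_step p rest hs c

theorem isspace_subst (c : Char) : PySem.Chars.isspace (pvSubst pvPunct c) = pvSep c := by
  unfold pvSubst pvSep
  by_cases h : pvPunct.contains c = true
  · rw [if_pos h, h, Bool.true_or]; decide
  · rw [Bool.not_eq_true] at h
    rw [if_neg (by rw [h]; simp), h, Bool.false_or]

theorem subst_of_not_sep (c : Char) (h : pvSep c = false) : pvSubst pvPunct c = c := by
  unfold pvSep at h
  rw [Bool.or_eq_false_iff] at h
  unfold pvSubst
  rw [h.1]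
  simp

theorem ofList_ne_space (t : List Char) (ht : t ≠ []) (hsp : ' ' ∉ t) :
    (String.ofList t ≠ " ") := by
  intro h
  have := congrArg String.toList h
  simp only [String.toList_ofList] at this
  have : t = [' '] := by simpa using this
  subst this
  exact hsp (by simp)

-- the main bridge: A's split-then-filter over the substituted string equals B's loop
theorem go_bridge :
    ∀ (l buf : List Char) (acc : List (List Char)),
      (∀ x ∈ buf, pvSep x = false) →
      (∀ t ∈ acc, t ≠ [] ∧ ' ' ∉ t) →
      (List.map String.ofList
          (PySem.Chars.split₀.go (l.map (pvSubst pvPunct)) buf.reverse acc)).filter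
          (fun term => term ≠ " ")
        = processnameAltGo l buf (List.map String.ofList acc.reverse) := by
  intro l
  induction l with
  | nil =>
      intro buf acc hbuf hacc
      simp only [List.map_nil]
      rw [PySem.Chars.split₀.go]
      by_cases hb : buf = []
      · subst hb
        simp only [List.reverse_nil, List.isEmpty_nil, if_pos, processnameAltGo]
        rw [List.filter_eq_self.mpr]
        intro t ht
        simp only [List.mem_map, List.mem_reverse] at ht
        obtain ⟨u, hu, rfl⟩ := ht
        simpa using ofList_ne_space u (hacc u hu).1 (hacc u hu).2
      · have hbe : buf.reverse.isEmpty = false := by simp [hb]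
        rw [hbe]
        simp only [Bool.false_eq_true, if_false, List.reverse_reverse, List.reverse_cons,
          List.map_append, List.map_cons, List.map_nil, processnameAltGo]
        rw [if_neg (by simp [hb])]
        rw [List.filter_eq_self.mpr]
        intro t ht
        simp only [List.mem_append, List.mem_map, List.mem_reverse, List.mem_cons,
          List.mem_singleton] at ht
        rcases ht with ⟨u, hu, rfl⟩ | hrest
        · simpa using ofList_ne_space u (hacc u hu).1 (hacc u hu).2
        · have heq : t = String.ofList buf := by simpa using hrest
          subst heq
          have hsp : ' ' ∉ buf := fun hin => by
            simpa [show pvSep ' ' = true from by decide] using hbuf ' ' hin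
          simpa using ofList_ne_space buf hb hsp
  | cons c rest ih =>
      intro buf acc hbuf hacc
      simp only [List.map_cons]
      rw [PySem.Chars.split₀.go]
      rw [isspace_subst]
      by_cases hc : pvSep c = true
      · rw [if_pos hc]
        by_cases hb : buf = []
        · subst hb
          simp only [List.reverse_nil, List.isEmpty_nil, if_pos]
          rw [show ([] : List Char) = ([] : List Char).reverse by simp] at *
          rw [ih [] acc (by simp) hacc]
          simp [processnameAltGo, hc]
        · have hbe : buf.reverse.isEmpty = false := by simp [hb]
          rw [hbe]
          simp only [Bool.false_eq_true, if_false, List.reverse_reverse]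
          rw [show ([] : List Char) = ([] : List Char).reverse by simp]
          rw [ih [] (buf :: acc) (by simp)
            (by
              intro t ht
              rcases List.mem_cons.mp ht with rfl | h
              · refine ⟨hb, fun hin => ?_⟩
                simpa [show pvSep ' ' = true from by decide] using hbuf ' ' hin
              · exact hacc t h)]
          simp [processnameAltGo, hc, hb]
      · have hc' : pvSep c = false := by simpa using hc
        rw [if_neg (by simp [hc'])]
        rw [subst_of_not_sep c hc']
        have : c :: buf.reverse = (buf ++ [c]).reverse := by simp
        rw [this]
        rw [ih (buf ++ [c]) acc
          (by intro x hx
              rcases List.mem_append.mp hx with h | h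
              · exact hbuf x h
              · simpa using (by simpa using h : x = c) ▸ hc') hacc]
        simp [processnameAltGo, hc']

theorem punct_no_space : ¬ pvPunct.contains ' ' := by decide

-- ===== VERDICT (by name: the statement is the Claim_ definition above) =====
theorem processname_spec : Claim_equal_processname := by
  intro name _
  unfold Spec_processname processname processname_alt
  simp only []
  rw [PySem.Str.split₀]
  unfold PySem.Chars.split₀
  rw [foldl_replace_eq_map pvPunct punct_no_space name]
  have := go_bridge name.toList [] [] (by simp) (by simp)
  simpa using this
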